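-- pv_equiv track=rewrite | github.com/arina-babinskaya/tenrek | extended_version/generator.py | generate_case_name
-- ===== SOURCE A (Python) =====
-- def generate_case_name(args, values):
--     parts = []
--
--     for arg, val in zip(args, values):
--         name = arg["name"]
--
--         if val in {"0", "0.0"}:
--             parts.append(f"{name}Zero")
--         elif val in {"1", "1.0"}:
--             parts.append(f"{name}One")
--         elif val in {"-1", "-1.0"}:
--             parts.append(f"{name}Negative")
--
--         elif val in {str(2**15 - 1), str(2**31 - 1), str(2**63 - 1), "3.4e38", "1.7e308"}:
--             parts.append(f"{name}Max_Val")
--         elif val in {str(-2**15), str(-2**31), str(-2**63), "-3.4e38", "-1.7e308"}: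
--             parts.append(f"{name}Min_Val")
-- # пока не трогаю char и string
-- # ВАЖНО: нужно будет учесть, что long long * long long по размеру больше просто long long
--
--         elif val == "true":
--             parts.append(f"{name}True")
--         elif val == "false":
--             parts.append(f"{name}False")
--         elif val == "nullptr":
--             parts.append(f"{name}Null")
--         elif val == '""':
--             parts.append(f"{name}Empty")
--         elif val.startswith('"'):
--             parts.append(f"{name}String")
--         else:
--             parts.append(f"{name}Val")
--
--     return "_".join(parts)
-- ===== SOURCE B (Python) =====
-- CATEGORIES = [
--     ("Zero", ["0", "0.0"]),
--     ("One", ["1", "1.0"]),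
--     ("Negative", ["-1", "-1.0"]),
--     ("Max_Val", ["32767", "2147483647", "9223372036854775807", "3.4e38", "1.7e308"]),
--     ("Min_Val", ["-32768", "-2147483648", "-9223372036854775808", "-3.4e38", "-1.7e308"]),
--     ("True", ["true"]),
--     ("False", ["false"]),
--     ("Null", ["nullptr"]),
--     ("Empty", ['""']),
-- ]
--
-- def generate_case_name(args, values):
--     pairs = list(zip(args, values))
--     # stage 1: category-major sweeps fill a placeholder suffix list
--     suf = [None] * len(pairs)
--     for label, members in CATEGORIES:
--         suf = [label if s is None and v in members else s
--                for s, (_, v) in zip(suf, pairs)]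
--     # stage 2: finalize (quote-string / plain fallback) and assemble
--     parts = []
--     for s, (arg, v) in zip(suf, pairs):
--         if s is None:
--             s = "String" if v.startswith('"') else "Val"
--         parts.append(arg["name"] + s)
--     return "_".join(parts)
-- ===== Notes on version B (the rewrite author's own statement) =====
-- stated objective: alternative
-- what changed: Inverts the loop nesting: instead of classifying each value through a per-value decision chain, B makes one sweep over the value list per category (category-major staged passes) filling a None-placeholder suffix list, then a finalizing pass applies the quote/plain fallback and assembles the parts.
import Mathlib
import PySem

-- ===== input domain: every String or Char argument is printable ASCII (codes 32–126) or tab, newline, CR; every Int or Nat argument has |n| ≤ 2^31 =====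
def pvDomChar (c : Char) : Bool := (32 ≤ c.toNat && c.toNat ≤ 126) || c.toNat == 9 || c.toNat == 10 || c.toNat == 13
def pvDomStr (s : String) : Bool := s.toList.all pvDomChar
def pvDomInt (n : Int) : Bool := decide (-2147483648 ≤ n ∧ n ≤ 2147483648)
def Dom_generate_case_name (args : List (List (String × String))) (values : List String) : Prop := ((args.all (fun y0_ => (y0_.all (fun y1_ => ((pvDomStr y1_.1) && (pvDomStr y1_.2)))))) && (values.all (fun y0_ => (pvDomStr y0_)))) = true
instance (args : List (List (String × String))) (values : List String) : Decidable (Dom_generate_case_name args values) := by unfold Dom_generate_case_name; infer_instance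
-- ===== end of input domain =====

-- B inverts the loop nesting: one sweep over the values per CATEGORY filling a
-- placeholder suffix list, then a finalizing pass (objective: alternative); return
-- values agree wherever Python A does not raise KeyError (missing "name" key — excluded by Pre_).

-- ===== PORT A =====
-- parts.append(...) in each branch of the elif chain
def pvStepA (parts : List String) (arg : List (String × String)) (val : String) : List String :=
  let name := ((PySem.Dict.mk arg).get? "name").getD ""   -- arg["name"]; Pre_ excludes the KeyError (none) case
  if val == "0" || val == "0.0" then parts ++ [name ++ "Zero"]
  else if val == "1" || val == "1.0" then parts ++ [name ++ "One"]
  else if val == "-1" || val == "-1.0" then parts ++ [name ++ "Negative"]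
  else if val == "32767" || val == "2147483647" || val == "9223372036854775807" || val == "3.4e38" || val == "1.7e308" then parts ++ [name ++ "Max_Val"]
  else if val == "-32768" || val == "-2147483648" || val == "-9223372036854775808" || val == "-3.4e38" || val == "-1.7e308" then parts ++ [name ++ "Min_Val"]
  else if val == "true" then parts ++ [name ++ "True"]
  else if val == "false" then parts ++ [name ++ "False"]
  else if val == "nullptr" then parts ++ [name ++ "Null"]
  else if val == "\"\"" then parts ++ [name ++ "Empty"]
  else if PySem.Str.startswith val "\"" then parts ++ [name ++ "String"]
  else parts ++ [name ++ "Val"]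

def generate_case_name (args : List (List (String × String))) (values : List String) : String :=
  PySem.Str.join "_" ((args.zip values).foldl (fun parts av => pvStepA parts av.1 av.2) [])

-- ===== PORT B =====
def pvCATEGORIES : List (String × List String) :=
  [("Zero", ["0", "0.0"]),
   ("One", ["1", "1.0"]),
   ("Negative", ["-1", "-1.0"]),
   ("Max_Val", ["32767", "2147483647", "9223372036854775807", "3.4e38", "1.7e308"]),
   ("Min_Val", ["-32768", "-2147483648", "-9223372036854775808", "-3.4e38", "-1.7e308"]),
   ("True", ["true"]),
   ("False", ["false"]),
   ("Null", ["nullptr"]),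
   ("Empty", ["\"\""])]

-- one category-major sweep: the list comprehension over zip(suf, pairs)
def pvSweep (pairs : List (List (String × String) × String)) (suf : List (Option String))
    (lc : String × List String) : List (Option String) :=
  (suf.zip pairs).map (fun sp => if sp.1 = none ∧ lc.2.contains sp.2.2 then some lc.1 else sp.1)

-- stage-2 finalizer for one (suffix, (arg, v)) entry
def pvFinalize (sp : Option String × (List (String × String) × String)) : String :=
  ((PySem.Dict.mk sp.2.1).get? "name").getD "" ++
    (match sp.1 with
     | some s => s
     | none => if PySem.Str.startswith sp.2.2 "\"" then "String" else "Val")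

def generate_case_name_alt (args : List (List (String × String))) (values : List String) : String :=
  PySem.Str.join "_"
    (((pvCATEGORIES.foldl (pvSweep (args.zip values))
        (List.replicate (args.zip values).length none)).zip (args.zip values)).map pvFinalize)

-- ===== PRECONDITION & SPEC =====
-- Pre_ excludes exactly the inputs where Python A raises KeyError: a zipped arg dict without a "name" key.
def Pre_generate_case_name (args : List (List (String × String))) (values : List String) : Prop :=
  ∀ p ∈ args.zip values, ((PySem.Dict.mk p.1).get? "name").isSome = true
instance (args : List (List (String × String))) (values : List String) : Decidable (Pre_generate_case_name args values) := by unfold Pre_generate_case_name; infer_instance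

def pvWitness_generate_case_name : (List (List (String × String))) × List String :=
  ([[("name", "x")], [("name", "y")]], ["0", "\"abc\""])

def Spec_generate_case_name (args : List (List (String × String))) (values : List String) (out : String) : Prop := out = generate_case_name_alt args values
instance (args : List (List (String × String))) (values : List String) (out : String) : Decidable (Spec_generate_case_name args values out) := by unfold Spec_generate_case_name; infer_instance

-- ===== CLAIM (what is proved, stated in full; the proofs are below) =====
def Claim_equal_generate_case_name : Prop := ∀ (args : List (List (String × String))) (values : List String), Dom_generate_case_name args values → Pre_generate_case_name args values → Spec_generate_case_name args values (generate_case_name args values)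

-- ===== LEMMAS AND PROOFS =====

-- the single element A's branch chain appends for one (arg, val) pair
def pvElemA (arg : List (String × String)) (val : String) : String :=
  ((PySem.Dict.mk arg).get? "name").getD "" ++
  (if val == "0" || val == "0.0" then "Zero"
   else if val == "1" || val == "1.0" then "One"
   else if val == "-1" || val == "-1.0" then "Negative"
   else if val == "32767" || val == "2147483647" || val == "9223372036854775807" || val == "3.4e38" || val == "1.7e308" then "Max_Val"
   else if val == "-32768" || val == "-2147483648" || val == "-9223372036854775808" || val == "-3.4e38" || val == "-1.7e308" then "Min_Val"
   else if val == "true" then "True"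
   else if val == "false" then "False"
   else if val == "nullptr" then "Null"
   else if val == "\"\"" then "Empty"
   else if PySem.Str.startswith val "\"" then "String"
   else "Val")

set_option maxHeartbeats 2000000 in
theorem pvStepA_eq (parts : List String) (arg : List (String × String)) (val : String) :
    pvStepA parts arg val = parts ++ [pvElemA arg val] := by
  simp only [pvStepA, pvElemA]
  split_ifs <;> rfl

-- pointwise category fold: what the staged sweeps compute at one value
def pvCatOf (cats : List (String × List String)) (v : String) : Option String :=
  cats.foldl (fun o lc => if o = none ∧ lc.2.contains v then some lc.1 else o) none

-- a sweep distributes over cons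
theorem pvSweep_cons (pairs : List (List (String × String) × String))
    (p : List (String × String) × String) (s : Option String) (suf : List (Option String))
    (lc : String × List String) :
    pvSweep (p :: pairs) (s :: suf) lc =
      (if s = none ∧ lc.2.contains p.2 then some lc.1 else s) :: pvSweep pairs suf lc := by
  simp [pvSweep]

-- the whole staged fold distributes over cons
theorem pvFold_cons (cats : List (String × List String))
    (pairs : List (List (String × String) × String))
    (p : List (String × String) × String) (s : Option String) (suf : List (Option String)) :
    cats.foldl (pvSweep (p :: pairs)) (s :: suf) =
      (cats.foldl (fun o lc => if o = none ∧ lc.2.contains p.2 then some lc.1 else o) s)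
        :: cats.foldl (pvSweep pairs) suf := by
  induction cats generalizing s suf with
  | nil => rfl
  | cons c cs ih =>
      simp only [List.foldl_cons, pvSweep_cons]
      exact ih _ _

-- the finalized B pipeline, elementwise
theorem pvB_map (pairs : List (List (String × String) × String)) :
    ((pvCATEGORIES.foldl (pvSweep pairs) (List.replicate pairs.length none)).zip pairs).map pvFinalize
      = pairs.map (fun p => pvFinalize (pvCatOf pvCATEGORIES p.2, p)) := by
  induction pairs with
  | nil =>
      have h : pvCATEGORIES.foldl (pvSweep ([] : List (List (String × String) × String))) [] = [] := by
        decide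
      simp [h]
  | cons p ps ih =>
      simp only [List.length_cons, List.replicate_succ, pvFold_cons, List.zip_cons_cons,
        List.map_cons, ih, pvCatOf]

-- elementwise: B's staged classification equals A's branch chain
set_option maxHeartbeats 4000000 in
theorem pvElem_eq (arg : List (String × String)) (val : String) :
    pvFinalize (pvCatOf pvCATEGORIES val, (arg, val)) = pvElemA arg val := by
  by_cases h0 : val = "0"
  · subst h0; rfl
  by_cases h1 : val = "0.0"
  · subst h1; rfl
  by_cases h2 : val = "1"
  · subst h2; rfl
  by_cases h3 : val = "1.0"
  · subst h3; rfl
  by_cases h4 : val = "-1"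
  · subst h4; rfl
  by_cases h5 : val = "-1.0"
  · subst h5; rfl
  by_cases h6 : val = "32767"
  · subst h6; rfl
  by_cases h7 : val = "2147483647"
  · subst h7; rfl
  by_cases h8 : val = "9223372036854775807"
  · subst h8; rfl
  by_cases h9 : val = "3.4e38"
  · subst h9; rfl
  by_cases h10 : val = "1.7e308"
  · subst h10; rfl
  by_cases h11 : val = "-32768"
  · subst h11; rfl
  by_cases h12 : val = "-2147483648"
  · subst h12; rfl
  by_cases h13 : val = "-9223372036854775808"
  · subst h13; rfl
  by_cases h14 : val = "-3.4e38"
  · subst h14; rfl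
  by_cases h15 : val = "-1.7e308"
  · subst h15; rfl
  by_cases h16 : val = "true"
  · subst h16; rfl
  by_cases h17 : val = "false"
  · subst h17; rfl
  by_cases h18 : val = "nullptr"
  · subst h18; rfl
  by_cases h19 : val = "\"\""
  · subst h19; rfl
  simp [pvCatOf, pvCATEGORIES, pvFinalize, pvElemA, h0, h1, h2, h3, h4, h5, h6, h7, h8, h9, h10,
    h11, h12, h13, h14, h15, h16, h17, h18, h19]

-- ===== VERDICT (by name: the statement is the Claim_ definition above) =====
theorem generate_case_name_spec : Claim_equal_generate_case_name := by
  intro args values _ _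
  unfold Spec_generate_case_name generate_case_name generate_case_name_alt
  have h : (fun (parts : List String) (av : List (String × String) × String) => pvStepA parts av.1 av.2)
      = fun parts av => parts ++ [pvElemA av.1 av.2] := by
    funext parts av; exact pvStepA_eq parts av.1 av.2
  rw [h, PySem.List.foldl_append_singleton_eq_map, pvB_map]
  congr 1
  exact List.map_congr_left (fun p _ => (pvElem_eq p.1 p.2).symm)
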